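-- pv_equiv track=rewrite | github.com/brianlockwood43/epoxy-bot | retrieval/service.py | format_memory_events_window
-- ===== SOURCE A (Python) =====
-- def format_memory_events_window(rows: list[tuple[str, str, str, str]], max_chars: int = 12000) -> str:
--     if not rows:
--         return "(no memory events)"
--     rows = list(reversed(rows))
--     out_lines = []
--     total = 0
--     for created_at_utc, author_name, channel_name, text in rows:
--         ts = created_at_utc
--         if ts and "T" in ts:
--             try:
--                 ts = ts.split("T", 1)[1][:5]
--             except Exception:
--                 pass
--         channel = channel_name or "unknown-channel"
--         who = author_name or "unknown-author"
--         clean = " ".join((text or "").split())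
--         line = f"[{ts}] {who} #{channel} :: {clean}"
--         if total + len(line) + 1 > max_chars:
--             break
--         out_lines.append(line)
--         total += len(line) + 1
--     return "\n".join(out_lines)
-- ===== SOURCE B (Python) =====
-- def _default(s, d):
--     return d if s == "" else s
--
--
-- def _fmt(row):
--     created_at_utc, author_name, channel_name, text = row
--     ts = created_at_utc
--     if "T" in created_at_utc:
--         ts = created_at_utc.split("T", 1)[1][:5]
--     clean = " ".join(text.split())
--     tail = " ".join([_default(author_name, "unknown-author"),
--                      "#" + _default(channel_name, "unknown-channel"),
--                      "::", clean])
--     return "[" + ts + "] " + tail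
--
--
-- def format_memory_events_window(rows, max_chars=12000):
--     if not rows:
--         return "(no memory events)"
--     lines = [_fmt(r) for r in rows[::-1]]
--     sums = []
--     acc = 0
--     for ln in lines:
--         acc += len(ln) + 1
--         sums.append(acc)
--     kept = 0
--     for s in sums:
--         if s > max_chars:
--             break
--         kept += 1
--     return "\n".join(lines[:kept])
-- ===== Notes on version B (the rewrite author's own statement) =====
-- stated objective: simpler
-- what changed: A's single loop that formats each line, accumulates the running total and breaks is decomposed into staged passes: format every line with a helper (assembling the line tail with one join over its pieces), build the prefix-sum list of len(line)+1, count how many leading sums fit the budget, then take+join that prefix.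
import Mathlib
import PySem

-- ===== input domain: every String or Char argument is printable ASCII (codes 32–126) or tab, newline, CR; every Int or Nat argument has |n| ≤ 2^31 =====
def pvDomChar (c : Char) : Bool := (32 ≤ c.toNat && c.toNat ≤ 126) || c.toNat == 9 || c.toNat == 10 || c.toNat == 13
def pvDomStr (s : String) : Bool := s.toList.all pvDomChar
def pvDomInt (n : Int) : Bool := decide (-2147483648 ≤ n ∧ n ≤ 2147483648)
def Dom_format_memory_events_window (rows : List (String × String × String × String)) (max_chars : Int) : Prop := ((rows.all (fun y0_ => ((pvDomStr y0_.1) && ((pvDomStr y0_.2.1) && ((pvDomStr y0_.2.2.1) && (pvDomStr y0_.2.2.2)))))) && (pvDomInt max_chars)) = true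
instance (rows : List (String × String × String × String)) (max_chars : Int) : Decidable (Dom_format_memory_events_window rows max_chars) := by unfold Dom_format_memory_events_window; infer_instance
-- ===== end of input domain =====

-- B splits A's break-loop into independent stages: format every line, build the prefix-sum list of len+1,
-- count how many leading sums fit the budget, take+join (objective: simpler; same behaviour; same cost).

-- ===== PORT A =====
-- A's for-loop with break: state = (out_lines, total); the line is formatted inline as in A.
def pvALoop (mc : Int) : List (String × String × String × String) → List String → Int → List String
  | [], out, _ => out
  | (created, author, channel_name, text) :: rest, out, total =>
    let ts := if (created != "") && PySem.Str.isIn "T" created then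
        PySem.Str.slice (((PySem.Str.splitMax? created "T" 1).getD []).getD 1 "") none (some 5)
      else created
    let channel := if channel_name != "" then channel_name else "unknown-channel"
    let who := if author != "" then author else "unknown-author"
    let clean := PySem.Str.join " " (PySem.Str.split₀ text)
    let line := "[" ++ ts ++ "] " ++ who ++ " #" ++ channel ++ " :: " ++ clean
    if total + PySem.Str.len line + 1 > mc then out
    else pvALoop mc rest (out ++ [line]) (total + PySem.Str.len line + 1)

def format_memory_events_window (rows : List (String × String × String × String)) (max_chars : Int) : String :=
  if rows = [] then "(no memory events)"
  else PySem.Str.join "\n" (pvALoop max_chars rows.reverse [] 0)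

-- ===== PORT B =====
-- Source B's _default
def pvDefault (s d : String) : String := if s == "" then d else s

-- Source B's _fmt: the tail of the line is assembled with one " ".join over its four pieces
def pvFmt : String × String × String × String → String
  | (created, author, channel_name, text) =>
    let ts := if PySem.Str.isIn "T" created then
        PySem.Str.slice (((PySem.Str.splitMax? created "T" 1).getD []).getD 1 "") none (some 5)
      else created
    let clean := PySem.Str.join " " (PySem.Str.split₀ text)
    let tail := PySem.Str.join " " [pvDefault author "unknown-author",
                                    "#" ++ pvDefault channel_name "unknown-channel",
                                    "::", clean]
    "[" ++ ts ++ "] " ++ tail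

-- Source B's prefix-sum loop over len(line)+1
def pvSums : List String → Int → List Int
  | [], _ => []
  | l :: rest, acc => (acc + PySem.Str.len l + 1) :: pvSums rest (acc + PySem.Str.len l + 1)

-- Source B's counting loop: leading sums that stay within the budget
def pvKept (mc : Int) : List Int → Nat
  | [] => 0
  | s :: rest => if s > mc then 0 else pvKept mc rest + 1

def format_memory_events_window_alt (rows : List (String × String × String × String)) (max_chars : Int) : String :=
  if rows = [] then "(no memory events)"
  else
    let lines := ((PySem.List.slice? rows none none (-1)).getD []).map pvFmt
    PySem.Str.join "\n" (lines.take (pvKept max_chars (pvSums lines 0)))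

-- ===== PRECONDITION & SPEC =====
def Spec_format_memory_events_window (rows : List (String × String × String × String)) (max_chars : Int) (out : String) : Prop := out = format_memory_events_window_alt rows max_chars
instance (rows : List (String × String × String × String)) (max_chars : Int) (out : String) : Decidable (Spec_format_memory_events_window rows max_chars out) := by unfold Spec_format_memory_events_window; infer_instance

-- ===== CLAIM (what is proved, stated in full; the proofs are below) =====
def Claim_equal_format_memory_events_window : Prop := ∀ (rows : List (String × String × String × String)) (max_chars : Int), Dom_format_memory_events_window rows max_chars → Spec_format_memory_events_window rows max_chars (format_memory_events_window rows max_chars)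

-- ===== LEMMAS AND PROOFS =====
-- A's inline line formatting equals Source B's _fmt.
theorem pvFmt_eq (created author channel_name text : String) :
    (let ts := if (created != "") && PySem.Str.isIn "T" created then
        PySem.Str.slice (((PySem.Str.splitMax? created "T" 1).getD []).getD 1 "") none (some 5)
      else created
     let channel := if channel_name != "" then channel_name else "unknown-channel"
     let who := if author != "" then author else "unknown-author"
     let clean := PySem.Str.join " " (PySem.Str.split₀ text)
     "[" ++ ts ++ "] " ++ who ++ " #" ++ channel ++ " :: " ++ clean)
    = pvFmt (created, author, channel_name, text) := by
  have hcond : ((created != "") && PySem.Str.isIn "T" created) = PySem.Str.isIn "T" created := by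
    by_cases hT : PySem.Str.isIn "T" created = true
    · have hne : created ≠ "" := by
        intro h0
        rw [h0] at hT
        exact absurd hT (by decide)
      rw [hT, Bool.and_true]
      simp [hne]
    · have hF : PySem.Str.isIn "T" created = false := by simpa using hT
      rw [hF, Bool.and_false]
  simp only [pvFmt, hcond]
  apply String.toList_inj.mp
  simp only [pvDefault, bne, PySem.Str.toList_join, List.map_cons, List.map_nil,
    String.toList_append, PySem.Chars.join_cons_cons]
  by_cases ha : author == ""
  · by_cases hc : channel_name == "" <;>
      simp [ha, hc, PySem.Chars.join, List.intercalate, List.intersperse]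
  · by_cases hc : channel_name == "" <;>
      simp [ha, hc, PySem.Chars.join, List.intercalate, List.intersperse]

theorem pvALoop_eq (mc : Int) (l : List (String × String × String × String))
    (out : List String) (total : Int) :
    pvALoop mc l out total
      = out ++ (l.map pvFmt).take (pvKept mc (pvSums (l.map pvFmt) total)) := by
  induction l generalizing out total with
  | nil => simp [pvALoop, pvSums, pvKept]
  | cons r rest ih =>
    obtain ⟨c, a, ch, t⟩ := r
    rw [pvALoop, pvFmt_eq]
    simp only [List.map_cons, pvSums, pvKept]
    by_cases h : total + PySem.Str.len (pvFmt (c, a, ch, t)) + 1 > mc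
    · rw [if_pos h, if_pos h]
      simp
    · rw [if_neg h, if_neg h, ih]
      simp

-- ===== VERDICT (by name: the statement is the Claim_ definition above) =====
theorem format_memory_events_window_spec : Claim_equal_format_memory_events_window := by
  intro rows mc _
  unfold Spec_format_memory_events_window format_memory_events_window format_memory_events_window_alt
  by_cases h : rows = []
  · simp [h]
  · simp only [if_neg h, PySem.List.slice?_none_none_neg_one, Option.getD_some]
    rw [pvALoop_eq]
    simp
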